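-- pv_equiv track=rewrite | github.com/pdhyeong/Junglepdh | 프로그래머스/unrated/181890. 왼쪽 오른쪽/왼쪽 오른쪽.py | solution
-- ===== SOURCE A (Python) =====
-- def solution(str_list):
--     answer = []
--     check = 0
--     im = 0
--     for i in range(len(str_list)):
--         if str_list[i] == 'l':
--             check = i
--             im = 1
--             break
--         if str_list[i] == 'r':
--             check = i
--             im = 2
--             break
--     if im == 1:
--         for i in range(check):
--             answer.append(str_list[i])
--     if im == 2:
--         for i in range(check+1,len(str_list)):
--             answer.append(str_list[i])
--     return answer
-- ===== SOURCE B (Python) =====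
-- def solution(str_list):
--     # One pass: partition into the segment before the first marker and the
--     # segment after it, remembering which marker was seen; then select.
--     before = []
--     after = []
--     marker = ''
--     for x in str_list:
--         if marker:
--             after.append(x)
--         elif x == 'l' or x == 'r':
--             marker = x
--         else:
--             before.append(x)
--     if marker == 'l':
--         return before
--     if marker == 'r':
--         return after
--     return []
-- ===== Notes on version B (the rewrite author's own statement) =====
-- stated objective: alternative
-- what changed: Instead of locating the first marker's index with a break scan and then re-copying by index ranges, B makes one forward pass that simultaneously accumulates the segment before the first marker and the segment after it, then selects by the stored marker.
import Mathlib
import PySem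

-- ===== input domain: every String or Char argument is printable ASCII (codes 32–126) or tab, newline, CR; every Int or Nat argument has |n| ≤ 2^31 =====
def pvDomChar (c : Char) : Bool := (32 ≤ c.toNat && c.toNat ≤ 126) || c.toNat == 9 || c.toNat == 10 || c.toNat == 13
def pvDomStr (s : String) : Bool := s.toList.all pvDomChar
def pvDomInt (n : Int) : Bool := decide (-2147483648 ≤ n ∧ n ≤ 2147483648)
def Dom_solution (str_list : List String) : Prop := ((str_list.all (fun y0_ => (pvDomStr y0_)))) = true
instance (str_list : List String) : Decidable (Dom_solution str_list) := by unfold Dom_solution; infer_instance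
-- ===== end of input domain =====

-- B replaces A's break scan for the first marker index plus two index-range copy
-- loops by one forward pass that partitions the list into the segments before and
-- after the first marker and then selects (objective: alternative, same cost).

-- ===== PORT A =====
-- the first for-loop with break: scans with running index i, returns (check, im)
def solutionScan : List String → Nat → Nat × Nat
  | [], _ => (0, 0)
  | x :: xs, i =>
    if x = "l" then (i, 1)
    else if x = "r" then (i, 2)
    else solutionScan xs (i + 1)

def solution (str_list : List String) : List String :=
  let answer : List String := []
  let ci := solutionScan str_list 0
  let check := ci.1
  let im := ci.2
  let answer :=
    if im = 1 then
      (PySem.List.pyRange 0 (check : Int) 1).foldl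
        (fun acc i => acc ++ [PySem.List.pyGetD str_list i ""]) answer
    else answer
  let answer :=
    if im = 2 then
      (PySem.List.pyRange ((check : Int) + 1) (str_list.length : Int) 1).foldl
        (fun acc i => acc ++ [PySem.List.pyGetD str_list i ""]) answer
    else answer
  answer

-- ===== PORT B =====
-- state (before, after, marker); one step of Source B's loop body
def solutionAltStep (s : List String × List String × String) (x : String) :
    List String × List String × String :=
  if s.2.2 ≠ "" then (s.1, s.2.1 ++ [x], s.2.2)
  else if x = "l" ∨ x = "r" then (s.1, s.2.1, x)
  else (s.1 ++ [x], s.2.1, s.2.2)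

def solution_alt (str_list : List String) : List String :=
  let st := str_list.foldl solutionAltStep ([], [], "")
  if st.2.2 = "l" then st.1
  else if st.2.2 = "r" then st.2.1
  else []

-- ===== PRECONDITION & SPEC =====
def Spec_solution (str_list : List String) (out : List String) : Prop := out = solution_alt str_list
instance (str_list : List String) (out : List String) : Decidable (Spec_solution str_list out) := by unfold Spec_solution; infer_instance

-- ===== CLAIM (what is proved, stated in full; the proofs are below) =====
def Claim_equal_solution : Prop := ∀ (str_list : List String), Dom_solution str_list → Spec_solution str_list (solution str_list)

-- ===== LEMMAS AND PROOFS =====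

def liOf (xs : List String) : Nat := if "l" ∈ xs then xs.idxOf "l" else xs.length
def riOf (xs : List String) : Nat := if "r" ∈ xs then xs.idxOf "r" else xs.length

theorem liOf_cons_of_ne (x : String) (xs : List String) (h : x ≠ "l") :
    liOf (x :: xs) = liOf xs + 1 := by
  simp [liOf, h]
  split_ifs with h1 h2 h2 <;> simp_all

theorem riOf_cons_of_ne (x : String) (xs : List String) (h : x ≠ "r") :
    riOf (x :: xs) = riOf xs + 1 := by
  simp [riOf, h]
  split_ifs with h1 h2 h2 <;> simp_all

theorem riOf_lt_length (xs : List String) (h : "r" ∈ xs) : riOf xs < xs.length := by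
  simp [riOf, h, List.idxOf_lt_length_of_mem h]

theorem riOf_le_length (xs : List String) : riOf xs ≤ xs.length := by
  by_cases h : "r" ∈ xs
  · exact le_of_lt (riOf_lt_length xs h)
  · simp [riOf, h]

theorem scan_eq (xs : List String) (i : Nat) :
    solutionScan xs i =
      if liOf xs < riOf xs then (i + liOf xs, 1)
      else if riOf xs < liOf xs then (i + riOf xs, 2)
      else (0, 0) := by
  induction xs generalizing i with
  | nil => simp [solutionScan, liOf, riOf]
  | cons x xs ih =>
    by_cases hl : x = "l"
    · subst hl
      have hli : liOf ("l" :: xs) = 0 := by simp [liOf]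
      have hri : 0 < riOf ("l" :: xs) := by
        rw [riOf_cons_of_ne _ _ (by decide)]; omega
      simp [solutionScan, hli]
      omega
    · by_cases hr : x = "r"
      · subst hr
        have hri : riOf ("r" :: xs) = 0 := by simp [riOf]
        have hli : 0 < liOf ("r" :: xs) := by
          rw [liOf_cons_of_ne _ _ (by decide)]; omega
        simp [solutionScan, hl, hri]
        omega
      · rw [liOf_cons_of_ne _ _ hl, riOf_cons_of_ne _ _ hr]
        simp only [solutionScan, if_neg hl, if_neg hr, ih (i + 1)]
        split_ifs with h1 h2 h3 h4 h5 <;> first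
          | rfl
          | (exfalso; omega)
          | (simp; omega)

-- A's first copy loop builds xs.take c
theorem foldl_take (xs : List String) (c : Nat) (h : c ≤ xs.length) :
    (PySem.List.pyRange 0 (c : Int) 1).foldl
      (fun acc i => acc ++ [PySem.List.pyGetD xs i ""]) [] = xs.take c := by
  induction c with
  | zero => simp [PySem.List.pyRange_one_eq_nil]
  | succ n ih =>
    have hn : n ≤ xs.length := by omega
    rw [show ((n + 1 : Nat) : Int) = (n : Int) + 1 by push_cast; ring,
      PySem.List.pyRange_one_succ_right (by omega), List.foldl_append, ih hn]
    have hlt : n < xs.length := by omega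
    simp only [List.foldl_cons, List.foldl_nil]
    rw [PySem.List.pyGetD_natCast, List.getD_eq_getElem xs "" hlt, List.take_add_one,
      List.getElem?_eq_getElem hlt]
    simp

-- A's second copy loop builds xs.drop (c+1)
theorem foldl_drop (xs : List String) (c : Nat) :
    (PySem.List.pyRange ((c : Int) + 1) (xs.length : Int) 1).foldl
      (fun acc i => acc ++ [PySem.List.pyGetD xs i ""]) [] = xs.drop (c + 1) := by
  have h := PySem.List.foldl_pyRange_pyGetD (xs := xs) (d := "")
    (f := fun (acc : List String) (x : String) => acc ++ [x]) (init := ([] : List String))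
    (a := ((c + 1 : Nat) : Int)) (by positivity)
  simp only [PySem.List.len, Int.toNat_natCast] at h
  rw [show ((c : Int) + 1) = ((c + 1 : Nat) : Int) by push_cast; ring]
  exact h.trans (by simp [-List.map_drop, ← List.flatMap_def])

-- once the marker is set, B's loop only appends the rest to `after`
theorem foldB_marked (xs : List String) (b a : List String) (m : String) (hm : m ≠ "") :
    xs.foldl solutionAltStep (b, a, m) = (b, a ++ xs, m) := by
  induction xs generalizing a with
  | nil => simp
  | cons x xs ih =>
    simp only [List.foldl_cons, solutionAltStep, if_pos hm]
    rw [ih (a ++ [x])]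
    simp

-- B's loop from the initial marker "" partitions around the first marker
theorem foldB_none (xs : List String) (b a : List String) :
    xs.foldl solutionAltStep (b, a, "") =
      if liOf xs < riOf xs then (b ++ xs.take (liOf xs), a ++ xs.drop (liOf xs + 1), "l")
      else if riOf xs < liOf xs then (b ++ xs.take (riOf xs), a ++ xs.drop (riOf xs + 1), "r")
      else (b ++ xs, a, "") := by
  induction xs generalizing b with
  | nil => simp [liOf, riOf]
  | cons x xs ih =>
    by_cases hl : x = "l"
    · subst hl
      have hli : liOf ("l" :: xs) = 0 := by simp [liOf]
      have hri : 0 < riOf ("l" :: xs) := by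
        rw [riOf_cons_of_ne _ _ (by decide)]; omega
      simp only [List.foldl_cons, solutionAltStep]
      rw [if_neg (by simp), if_pos (show True ∨ ("l":String) = "r" from Or.inl trivial),
        foldB_marked xs b a "l" (by decide)]
      rw [if_pos (by omega), hli]
      simp
    · by_cases hr : x = "r"
      · subst hr
        have hri : riOf ("r" :: xs) = 0 := by simp [riOf]
        have hli : 0 < liOf ("r" :: xs) := by
          rw [liOf_cons_of_ne _ _ (by decide)]; omega
        simp only [List.foldl_cons, solutionAltStep]
        rw [if_neg (by simp), if_pos (show ("r":String) = "l" ∨ True from Or.inr trivial),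
          foldB_marked xs b a "r" (by decide)]
        rw [if_neg (by omega), if_pos (by omega), hri]
        simp
      · rw [liOf_cons_of_ne _ _ hl, riOf_cons_of_ne _ _ hr]
        simp only [List.foldl_cons, solutionAltStep]
        rw [if_neg (by simp), if_neg (by simp [hl, hr]), ih (b ++ [x])]
        split_ifs with h1 h2 h3 h4 h5 <;> first
          | (exfalso; omega)
          | (simp [List.take_succ_cons, List.drop_succ_cons])

-- B in take/drop form
theorem alt_eq (xs : List String) :
    solution_alt xs =
      if liOf xs < riOf xs then xs.take (liOf xs)
      else if riOf xs < liOf xs then xs.drop (riOf xs + 1)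
      else [] := by
  unfold solution_alt
  rw [foldB_none xs [] []]
  split_ifs with h1 h2 <;> simp

-- ===== VERDICT (by name: the statement is the Claim_ definition above) =====
theorem solution_spec : Claim_equal_solution := by
  intro xs _
  unfold Spec_solution
  rw [alt_eq]
  unfold solution
  rw [scan_eq]
  split_ifs with h1 h2
  · have hlt : liOf xs < xs.length := by
      have := riOf_le_length xs; omega
    simp only [Nat.zero_add]
    simp only [show (1 : Nat) ≠ 2 by decide, if_true, if_false]
    exact foldl_take xs (liOf xs) (le_of_lt hlt)
  · simp only [Nat.zero_add]
    simp only [show (2 : Nat) ≠ 1 by decide, reduceIte]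
    exact foldl_drop xs (riOf xs)
  · simp
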